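-- pv_equiv track=rewrite | github.com/RC-diamond-GH/badger_parser | old/badger_parser - 副本.py | getTrueData
-- ===== SOURCE A (Python) =====
-- def getTrueData(data):
--     i = len(data)
--     truedata = []
--     while i > 0:
--         i -= 1
--         for x in data[i]:
--             truedata.append(x)
--     return truedata
-- ===== SOURCE B (Python) =====
-- def getTrueData(data):
--     truedata = []
--     for row in data:
--         truedata = list(row) + truedata
--     return truedata
-- ===== Notes on version B (the rewrite author's own statement) =====
-- stated objective: alternative
-- what changed: B iterates forward over data and prepends each whole row to the accumulator, instead of A's backward index loop with an inner element-by-element append; it trades A's amortized-linear appends for repeated list concatenation.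
import Mathlib
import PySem

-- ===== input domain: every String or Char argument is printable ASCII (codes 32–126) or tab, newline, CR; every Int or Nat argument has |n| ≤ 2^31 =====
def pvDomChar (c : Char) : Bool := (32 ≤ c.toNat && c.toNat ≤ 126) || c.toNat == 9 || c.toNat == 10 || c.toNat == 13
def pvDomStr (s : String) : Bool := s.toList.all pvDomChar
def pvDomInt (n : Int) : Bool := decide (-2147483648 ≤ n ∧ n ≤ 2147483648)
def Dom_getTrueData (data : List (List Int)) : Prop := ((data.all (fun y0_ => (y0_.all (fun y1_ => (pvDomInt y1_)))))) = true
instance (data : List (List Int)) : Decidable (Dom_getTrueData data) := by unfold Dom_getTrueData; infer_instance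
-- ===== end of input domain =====

-- B iterates forward and prepends each whole row; same value as A's backward index loop (alternative decomposition).

-- ===== PORT A =====
-- while i > 0: i -= 1; for x in data[i]: truedata.append(x)   (i always in range, so data[i] = getD i [])
def getTrueDataLoopA (data : List (List Int)) : Nat → List Int → List Int
  | 0, truedata => truedata
  | i + 1, truedata => getTrueDataLoopA data i (truedata ++ data.getD i [])

def getTrueData (data : List (List Int)) : List Int :=
  getTrueDataLoopA data data.length []

-- ===== PORT B =====
def getTrueData_alt (data : List (List Int)) : List Int :=
  data.foldl (fun truedata row => row ++ truedata) []

-- ===== PRECONDITION & SPEC =====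
def Spec_getTrueData (data : List (List Int)) (out : List Int) : Prop := out = getTrueData_alt data
instance (data : List (List Int)) (out : List Int) : Decidable (Spec_getTrueData data out) := by unfold Spec_getTrueData; infer_instance

-- ===== CLAIM (what is proved, stated in full; the proofs are below) =====
def Claim_equal_getTrueData : Prop := ∀ (data : List (List Int)), Dom_getTrueData data → Spec_getTrueData data (getTrueData data)

-- ===== LEMMAS AND PROOFS =====
theorem loopA_eq (data : List (List Int)) :
    ∀ (i : Nat), i ≤ data.length → ∀ (acc : List Int),
      getTrueDataLoopA data i acc = acc ++ ((data.take i).reverse).flatten := by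
  intro i
  induction i with
  | zero => intro _ acc; simp [getTrueDataLoopA]
  | succ i ih =>
    intro hle acc
    have hi : i < data.length := Nat.lt_of_succ_le hle
    have htake : List.take (i + 1) data = List.take i data ++ [data[i]] := by
      rw [List.take_add_one]; simp [List.getElem?_eq_getElem hi]
    rw [getTrueDataLoopA, ih (Nat.le_of_lt hi), htake]
    simp only [List.getD, List.getElem?_eq_getElem hi, Option.getD_some, List.reverse_append,
      List.reverse_singleton, List.singleton_append, List.flatten_cons, List.append_assoc]

theorem foldB_eq (data : List (List Int)) :
    ∀ (acc : List Int),
      data.foldl (fun truedata row => row ++ truedata) acc = (data.reverse).flatten ++ acc := by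
  induction data with
  | nil => intro acc; simp
  | cons r t ih => intro acc; simp [List.foldl, ih]

-- ===== VERDICT (by name: the statement is the Claim_ definition above) =====
theorem getTrueData_spec : Claim_equal_getTrueData := by
  intro data _
  unfold Spec_getTrueData getTrueData getTrueData_alt
  rw [loopA_eq data data.length le_rfl, foldB_eq]
  simp
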